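-- pv_equiv track=rewrite | github.com/NgoQuocBao1010/Python | Graph Theory/BredthFirstSearch/ShortestPathDungeon.py | recounstructPath
-- ===== SOURCE A (Python) =====
-- def recounstructPath(start, end, prev):
--
-- 	path = []
-- 	at = end
--
-- 	while at is not None:
-- 		path.append(at)
-- 		at = prev[at[0]][at[1]]
--
-- 	path.reverse()
--
-- 	if path[0] == start:
-- 		return path
-- 	return []
-- ===== SOURCE B (Python) =====
-- def recounstructPath(start, end, prev):
--     def build(at):
--         if at is None:
--             return []
--         return build(prev[at[0]][at[1]]) + [at]
--     path = build(end)
--     if path[0] == start: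
--         return path
--     return []
-- ===== Notes on version B (the rewrite author's own statement) =====
-- stated objective: simpler
-- what changed: B replaces the iterative append-then-reverse loop by a recursive helper that walks the predecessor chain and builds the path directly in start-to-end order, so no reverse pass is needed.
import Mathlib
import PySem

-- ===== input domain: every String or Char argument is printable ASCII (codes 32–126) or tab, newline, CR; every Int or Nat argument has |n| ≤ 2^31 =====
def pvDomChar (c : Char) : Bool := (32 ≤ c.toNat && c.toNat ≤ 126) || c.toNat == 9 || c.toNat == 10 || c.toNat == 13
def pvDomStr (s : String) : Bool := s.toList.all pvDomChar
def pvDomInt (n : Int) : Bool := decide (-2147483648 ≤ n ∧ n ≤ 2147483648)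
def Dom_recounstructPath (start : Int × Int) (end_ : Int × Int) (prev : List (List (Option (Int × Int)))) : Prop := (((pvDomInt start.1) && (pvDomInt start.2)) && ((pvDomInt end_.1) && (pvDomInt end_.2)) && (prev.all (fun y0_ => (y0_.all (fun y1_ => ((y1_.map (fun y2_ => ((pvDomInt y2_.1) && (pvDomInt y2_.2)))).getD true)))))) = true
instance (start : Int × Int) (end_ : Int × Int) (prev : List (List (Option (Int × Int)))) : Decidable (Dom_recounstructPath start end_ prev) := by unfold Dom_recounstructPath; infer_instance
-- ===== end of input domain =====

-- B replaces A's iterative append-then-reverse loop by a recursive chain walk that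
-- builds the path directly in start-to-end order (objective: simpler).


-- ===== PORT A =====
-- one step of A's loop body: prev[at[0]][at[1]] (Python indexing, negative wrap);
-- outer none = IndexError, some v = the stored cell (v = none ends the while loop)
def pvStep (prev : List (List (Option (Int × Int)))) (p : Int × Int) : Option (Option (Int × Int)) :=
  (PySem.List.pyGet? prev p.1).bind (fun row => PySem.List.pyGet? row p.2)

-- fuel bound for A's while loop: a terminating Python run visits each physical cell
-- at most once (the successor of a position is determined by its cell), so
-- sum of row lengths + 2 steps of fuel always suffice
def pvFuel (prev : List (List (Option (Int × Int)))) : Nat :=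
  (prev.map List.length).sum + 2

-- A's while loop, accumulating `path` by appending; none = IndexError / divergence
def pvLoopA (prev : List (List (Option (Int × Int)))) :
    Nat → Option (Int × Int) → List (Int × Int) → Option (List (Int × Int))
  | 0, _, _ => none
  | _ + 1, none, path => some path
  | f + 1, some p, path =>
    match pvStep prev p with
    | none => none
    | some nxt => pvLoopA prev f nxt (path ++ [p])

def recounstructPath (start : Int × Int) (end_ : Int × Int) (prev : List (List (Option (Int × Int)))) : List (Int × Int) :=
  match pvLoopA prev (pvFuel prev) (some end_) [] with
  | none => []
  | some path =>
    let path := path.reverse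
    if path.head? = some start then path else []

-- ===== PORT B =====
-- B's recursive build(at): [] when at is None, else build(prev[at[0]][at[1]]) + [at];
-- non-tail recursion, so the path comes out in start→end order with no reverse.
-- Fuel: the same bound as A's run needs, written as a fold over the rows.
def pvFuelB (prev : List (List (Option (Int × Int)))) : Nat :=
  prev.foldl (fun n row => n + row.length) 2

def pvBuildB (prev : List (List (Option (Int × Int)))) :
    Nat → Option (Int × Int) → Option (List (Int × Int))
  | 0, _ => none
  | _ + 1, none => some []
  | f + 1, some p =>
    match PySem.List.pyGet? prev p.1 with
    | none => none
    | some row =>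
      match PySem.List.pyGet? row p.2 with
      | none => none
      | some nxt =>
        match pvBuildB prev f nxt with
        | none => none
        | some built => some (built ++ [p])

def recounstructPath_alt (start : Int × Int) (end_ : Int × Int) (prev : List (List (Option (Int × Int)))) : List (Int × Int) :=
  match pvBuildB prev (pvFuelB prev) (some end_) with
  | none => []
  | some [] => []
  | some (p :: rest) => if p = start then p :: rest else []

-- ===== PRECONDITION & SPEC =====
-- one transition of the chain state: none = IndexError already happened,
-- some none = the chain has ended, some (some p) = currently at position p
def pvNext (prev : List (List (Option (Int × Int)))) :
    Option (Option (Int × Int)) → Option (Option (Int × Int))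
  | none => none
  | some none => some none
  | some (some p) => pvStep prev p

-- Pre_ excludes exactly the inputs on which Python A does not return: out-of-range
-- indexing into prev (IndexError) and cyclic predecessor chains (the while loop
-- diverges). Stated declaratively: the predecessor chain from end_ reaches its end
-- (state `some none`) within pvFuel prev transitions — a bound that any
-- terminating, error-free run satisfies, since it cannot revisit a cell.
def Pre_recounstructPath (start : Int × Int) (end_ : Int × Int) (prev : List (List (Option (Int × Int)))) : Prop :=
  ∃ k, k < pvFuel prev ∧ (pvNext prev)^[k] (some (some end_)) = some none
instance (start : Int × Int) (end_ : Int × Int) (prev : List (List (Option (Int × Int)))) : Decidable (Pre_recounstructPath start end_ prev) := by unfold Pre_recounstructPath; infer_instance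

def pvWitness_recounstructPath : (Int × Int) × (Int × Int) × (List (List (Option (Int × Int)))) :=
  ((0, 0), (1, 1), [[none, some (0, 0)], [some (0, 1), some (1, 0)]])

def Spec_recounstructPath (start : Int × Int) (end_ : Int × Int) (prev : List (List (Option (Int × Int)))) (out : List (Int × Int)) : Prop := out = recounstructPath_alt start end_ prev
instance (start : Int × Int) (end_ : Int × Int) (prev : List (List (Option (Int × Int)))) (out : List (Int × Int)) : Decidable (Spec_recounstructPath start end_ prev out) := by unfold Spec_recounstructPath; infer_instance

-- ===== CLAIM (what is proved, stated in full; the proofs are below) =====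
def Claim_equal_recounstructPath : Prop := ∀ (start : Int × Int) (end_ : Int × Int) (prev : List (List (Option (Int × Int)))), Dom_recounstructPath start end_ prev → Pre_recounstructPath start end_ prev → Spec_recounstructPath start end_ prev (recounstructPath start end_ prev)

-- ===== LEMMAS AND PROOFS =====

-- the two fuel expressions agree
theorem pvFuel_eq (prev : List (List (Option (Int × Int)))) : pvFuelB prev = pvFuel prev := by
  have h : ∀ (l : List (List (Option (Int × Int)))) (init : Nat),
      l.foldl (fun n row => n + row.length) init = (l.map List.length).sum + init := by
    intro l
    induction l with
    | nil => intro init; simp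
    | cons x xs ih => intro init; simp [List.foldl_cons, ih, List.map_cons]; omega
  simp [pvFuelB, pvFuel, h]

-- the error state is absorbing
theorem pvNext_iterate_none (prev : List (List (Option (Int × Int)))) :
    ∀ k : Nat, (pvNext prev)^[k] none = none := by
  intro k
  induction k with
  | zero => rfl
  | succ k ih => rw [Function.iterate_succ_apply]; exact ih

-- on a chain that reaches its end in k < f steps, both recursions return `some`,
-- and B's list is the reverse of A's accumulated list
theorem pvLoop_build (prev : List (List (Option (Int × Int)))) :
    ∀ (k f : Nat) (at_ : Option (Int × Int)) (acc : List (Int × Int)),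
      k < f → (pvNext prev)^[k] (some at_) = some none →
      ∃ l, pvLoopA prev f at_ acc = some (acc ++ l) ∧
           pvBuildB prev f at_ = some l.reverse := by
  intro k
  induction k with
  | zero =>
    intro f at_ acc hk h
    simp only [Function.iterate_zero_apply, Option.some.injEq] at h
    subst h
    cases f with
    | zero => exact absurd hk (Nat.not_lt_zero _)
    | succ f' => exact ⟨[], by simp [pvLoopA, pvBuildB]⟩
  | succ k ih =>
    intro f at_ acc hk h
    rw [Function.iterate_succ_apply] at h
    cases f with
    | zero => exact absurd hk (Nat.not_lt_zero _)
    | succ f' =>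
      cases at_ with
      | none => exact ⟨[], by simp [pvLoopA, pvBuildB]⟩
      | some p =>
        cases hrow : PySem.List.pyGet? prev p.1 with
        | none =>
          rw [show pvNext prev (some (some p)) = pvStep prev p from rfl] at h
          rw [show pvStep prev p = none from by simp [pvStep, hrow],
            pvNext_iterate_none] at h
          exact absurd h (by simp)
        | some row =>
          cases hc : PySem.List.pyGet? row p.2 with
          | none =>
            rw [show pvNext prev (some (some p)) = pvStep prev p from rfl] at h
            rw [show pvStep prev p = none from by simp [pvStep, hrow, hc],
              pvNext_iterate_none] at h
            exact absurd h (by simp)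
          | some nxt =>
            have hs : pvStep prev p = some nxt := by simp [pvStep, hrow, hc]
            rw [show pvNext prev (some (some p)) = pvStep prev p from rfl, hs] at h
            obtain ⟨l, hA, hB⟩ := ih f' nxt (acc ++ [p]) (Nat.lt_of_succ_lt_succ hk) h
            exact ⟨p :: l, by simp [pvLoopA, pvBuildB, hs, hrow, hc, hA, hB]⟩

theorem recounstructPath_spec_aux (start end_ : Int × Int)
    (prev : List (List (Option (Int × Int))))
    (h : Pre_recounstructPath start end_ prev) :
    recounstructPath start end_ prev = recounstructPath_alt start end_ prev := by
  obtain ⟨k, hk, hit⟩ := h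
  obtain ⟨l, hA, hB⟩ := pvLoop_build prev k (pvFuel prev) (some end_) [] hk hit
  unfold recounstructPath recounstructPath_alt
  rw [pvFuel_eq, hA, hB]
  cases hl : l.reverse with
  | nil => simp [hl]
  | cons p rest =>
    simp only [List.nil_append, hl, List.head?_cons]
    by_cases hp : p = start <;> simp [hp]

-- ===== VERDICT (by name: the statement is the Claim_ definition above) =====
theorem recounstructPath_spec : Claim_equal_recounstructPath := by
  intro start end_ prev _ hpre
  exact recounstructPath_spec_aux start end_ prev hpre
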